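-- pv_equiv track=rewrite | github.com/jabbors/lotto-data | lotto.py | calculateCombinationFrequency
-- ===== SOURCE A (Python) =====
-- def calculateCombinationFrequency(ucs):
--     frequencyMap = {}
--     for us in ucs:
--         key = ','.join(str(x) for x in us)
--         if key in frequencyMap:
--             frequency = frequencyMap[key]
--             frequencyMap[key] = frequency + 1
--         else:
--             frequencyMap[key] = 1
--     return frequencyMap
-- ===== SOURCE B (Python) =====
-- def calculateCombinationFrequency(ucs):
--     # Recursive group-and-remove: take the first key, derive its count from how
--     # much the list shrinks when all its copies are removed, recurse on the rest.
--     keys = [','.join(str(x) for x in us) for us in ucs]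
--
--     def tally(ks):
--         if not ks:
--             return {}
--         head = ks[0]
--         rest = [k for k in ks[1:] if k != head]
--         out = {head: len(ks) - len(rest)}
--         out.update(tally(rest))
--         return out
--
--     return tally(keys)
-- ===== Notes on version B (the rewrite author's own statement) =====
-- stated objective: alternative
-- what changed: Replaces the single-pass dict tally with a recursive group-and-remove scheme: each step takes the first key, obtains its count as the length drop after filtering out all its copies, and recurses on the filtered remainder; no counting dictionary is maintained.
import Mathlib
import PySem

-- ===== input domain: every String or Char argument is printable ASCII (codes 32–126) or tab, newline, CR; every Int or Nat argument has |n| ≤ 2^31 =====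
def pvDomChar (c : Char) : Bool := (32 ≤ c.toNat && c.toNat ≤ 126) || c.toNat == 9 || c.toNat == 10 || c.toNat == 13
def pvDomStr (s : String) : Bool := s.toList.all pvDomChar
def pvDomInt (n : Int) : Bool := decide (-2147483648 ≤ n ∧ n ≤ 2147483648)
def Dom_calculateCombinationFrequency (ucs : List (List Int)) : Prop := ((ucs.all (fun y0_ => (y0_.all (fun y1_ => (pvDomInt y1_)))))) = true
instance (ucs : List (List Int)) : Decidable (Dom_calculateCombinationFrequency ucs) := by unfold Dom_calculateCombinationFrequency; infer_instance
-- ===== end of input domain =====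

-- B replaces the dict tally by a recursive group-and-remove scheme (each key's count is the length drop after filtering it out); alternative decomposition, not faster.

-- ','.join(str(x) for x in us) — shared subexpression of both Pythons
def pvKey (us : List Int) : String := PySem.Str.join "," (us.map PySem.Int.toStr)

-- ===== PORT A =====
def calculateCombinationFrequency (ucs : List (List Int)) : List (String × Int) :=
  (ucs.foldl (fun (frequencyMap : PySem.Dict String Int) us =>
      let key := pvKey us
      if frequencyMap.contains key then
        let frequency := frequencyMap.getD key 0
        frequencyMap.insert key (frequency + 1)
      else
        frequencyMap.insert key 1) PySem.Dict.empty).items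

-- ===== PORT B =====
-- tally(ks): head's entry (count = len(ks) - len(rest)) followed by the recursive
-- tally of rest, whose keys are disjoint from head (so dict update appends them: cons)
def pvTally : List String → List (String × Int)
  | [] => []
  | head :: tail =>
    let rest := tail.filter (fun k => k != head)
    (head, ((head :: tail).length : Int) - (rest.length : Int)) :: pvTally rest
termination_by ks => ks.length
decreasing_by
  simpa using Nat.lt_succ_of_le (List.length_filter_le _ _)

def calculateCombinationFrequency_alt (ucs : List (List Int)) : List (String × Int) :=
  pvTally (ucs.map pvKey)

-- ===== PRECONDITION & SPEC =====
def Spec_calculateCombinationFrequency (ucs : List (List Int)) (out : List (String × Int)) : Prop := out = calculateCombinationFrequency_alt ucs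
instance (ucs : List (List Int)) (out : List (String × Int)) : Decidable (Spec_calculateCombinationFrequency ucs out) := by unfold Spec_calculateCombinationFrequency; infer_instance

-- ===== CLAIM (what is proved, stated in full; the proofs are below) =====
def Claim_equal_calculateCombinationFrequency : Prop := ∀ (ucs : List (List Int)), Dom_calculateCombinationFrequency ucs → Spec_calculateCombinationFrequency ucs (calculateCombinationFrequency ucs)

-- ===== LEMMAS AND PROOFS =====

-- both branches of A's loop body are the same insert
theorem pv_step_eq (d : PySem.Dict String Int) (key : String) :
    (if d.contains key then d.insert key (d.getD key 0 + 1) else d.insert key 1)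
      = d.insert key (d.getD key 0 + 1) := by
  by_cases h : d.contains key = true
  · simp [h]
  · have h0 : d.getD key 0 = 0 := by
      have := (PySem.Dict.get?_eq_none_iff_contains (d := d) (k := key)).mpr (by simp [h])
      simp [PySem.Dict.getD, this]
    simp [h, h0]

-- once h is in the accumulating set, later copies of h are no-ops of the fold
theorem pv_foldl_add_skip (h : String) : ∀ (l : List String) (s : PySem.Set String), h ∈ s →
    l.foldl PySem.Set.add s = (l.filter (fun k => k != h)).foldl PySem.Set.add s := by
  intro l
  induction l with
  | nil => intro s _; rfl
  | cons x t ih =>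
    intro s hs
    have hmem : h ∈ PySem.Set.add s x := by
      by_cases hm : x ∈ s <;> simp [PySem.Set.add, PySem.Set.contains, hm, hs]
    by_cases hx : x = h
    · subst hx
      have hadd : PySem.Set.add s x = s := by
        simp [PySem.Set.add, PySem.Set.contains, hs]
      simp [hadd, ih s hs]
    · have hbx : (x != h) = true := by simp [hx]
      simp only [List.foldl_cons, List.filter_cons, hbx, if_pos]
      exact ih _ hmem

-- a head element no later element equals stays a fixed prefix of the fold
theorem pv_foldl_add_prefix (h : String) : ∀ (l : List String) (s : List String),
    (∀ x ∈ l, x ≠ h) → l.foldl PySem.Set.add (h :: s) = h :: l.foldl PySem.Set.add s := by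
  intro l
  induction l with
  | nil => intro s _; rfl
  | cons x t ih =>
    intro s hl
    have hx : x ≠ h := hl x (by simp)
    have hstep : PySem.Set.add (h :: s) x = h :: PySem.Set.add s x := by
      by_cases hm : x ∈ s <;> simp [PySem.Set.add, PySem.Set.contains, hm, hx]
    simp only [List.foldl_cons, hstep]
    exact ih _ (fun y hy => hl y (by simp [hy]))

-- first-occurrence dedup of h :: t starts with h and continues on t with all h removed
theorem pv_dedup_cons (h : String) (t : List String) :
    PySem.List.dedup (h :: t) = h :: PySem.List.dedup (t.filter (fun k => k != h)) := by
  show PySem.Set.ofList (h :: t) = _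
  have h1 : PySem.Set.ofList (h :: t) = t.foldl PySem.Set.add [h] := by
    simp [PySem.Set.ofList, PySem.Set.add, PySem.Set.empty, PySem.Set.contains]
  rw [h1, pv_foldl_add_skip h t [h] (by simp),
    pv_foldl_add_prefix h _ [] (by intro x hx; simpa using (List.of_mem_filter hx))]
  rfl

-- the length drop under filtering out h is the number of copies of h
theorem pv_count_filter_len (h : String) (t : List String) :
    t.count h + (t.filter (fun k => k != h)).length = t.length := by
  induction t with
  | nil => rfl
  | cons x t ih =>
    by_cases hx : x = h
    · subst hx; simp; omega
    · simp [hx]; omega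

-- pvTally lists each distinct key (first-occurrence order) with its total count
theorem pv_tally_eq (ks : List String) :
    pvTally ks = (PySem.List.dedup ks).map (fun k => (k, (ks.count k : Int))) := by
  induction hn : ks.length using Nat.strong_induction_on generalizing ks with
  | _ n ih =>
  match ks, hn with
  | [], _ =>
    rw [pvTally]
    rfl
  | head :: tail, hn =>
    have hlt : (tail.filter (fun k => k != head)).length < n := by
      have := List.length_filter_le (fun k => k != head) tail
      simp only [List.length_cons] at hn
      omega
    rw [pvTally, pv_dedup_cons]
    simp only [List.map_cons]
    have hcount : ((head :: tail).length : Int) - ((tail.filter (fun k => k != head)).length : Int)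
        = ((head :: tail).count head : Int) := by
      have h1 := pv_count_filter_len head tail
      have h2 : (head :: tail).count head = tail.count head + 1 := by simp
      rw [h2]; push_cast [List.length_cons]; omega
    rw [ih _ hlt _ rfl]
    refine congrArg₂ _ (by rw [hcount]) ?_
    apply List.map_congr_left
    intro k hk
    have hkr : k ∈ tail.filter (fun x => x != head) :=
      (PySem.List.mem_dedup (xs := tail.filter (fun x => x != head)) (x := k)).mp hk
    have hkne : k ≠ head := by simpa using List.of_mem_filter hkr
    have hcf : (tail.filter (fun x => x != head)).count k = tail.count k :=
      List.count_filter (by simpa using hkne)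
    simp [Ne.symm hkne, hcf]

-- ===== VERDICT (by name: the statement is the Claim_ definition above) =====
theorem calculateCombinationFrequency_spec : Claim_equal_calculateCombinationFrequency := by
  intro ucs _
  unfold Spec_calculateCombinationFrequency calculateCombinationFrequency calculateCombinationFrequency_alt
  have hfold : ucs.foldl (fun (d : PySem.Dict String Int) us =>
      let key := pvKey us
      if d.contains key then
        let frequency := d.getD key 0
        d.insert key (frequency + 1)
      else
        d.insert key 1) PySem.Dict.empty
      = (ucs.map pvKey).foldl (fun d k => d.insert k (d.getD k 0 + 1)) PySem.Dict.empty := by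
    rw [List.foldl_map]
    simp only [pv_step_eq]
  rw [hfold, PySem.Dict.foldl_insert_getD_add_one_eq_counter, PySem.Dict.items_counter,
    pv_tally_eq]
  simp [PySem.List.dedup_eq_ofList]
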